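-- pv_equiv track=rewrite | github.com/JorSanders/Esp8266 | Games/Pong.py | circleRectangleCollision
-- ===== SOURCE A (Python) =====
-- def circleRectangleCollision(circleX, circleY, circleR, rectX, rectY, rectWidth, rectHeight):
--     for x in range(rectX, rectX + rectWidth + 1):
--         for y in range(rectY, rectY + rectHeight + 1):
--             distanceX = x - circleX
--             distanceY = y - circleY
--             if distanceX * distanceX + distanceY * distanceY <= circleR * circleR:
--                 return True
--     return False
-- ===== SOURCE B (Python) =====
-- def circleRectangleCollision(circleX, circleY, circleR, rectX, rectY, rectWidth, rectHeight):
--     # Empty lattice (negative width/height): nothing to hit.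
--     if rectWidth < 0 or rectHeight < 0:
--         return False
--     # Nearest integer lattice point of the rectangle per axis (center coords are ints).
--     nearestX = min(max(circleX, rectX), rectX + rectWidth)
--     nearestY = min(max(circleY, rectY), rectY + rectHeight)
--     dx = nearestX - circleX
--     dy = nearestY - circleY
--     return dx * dx + dy * dy <= circleR * circleR
-- ===== Notes on version B (the rewrite author's own statement) =====
-- stated objective: alternative
-- what changed: Replaces the scan of all rectangle lattice points with a single distance check against the per-axis clamp of the circle center (the nearest lattice point).
import Mathlib
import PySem

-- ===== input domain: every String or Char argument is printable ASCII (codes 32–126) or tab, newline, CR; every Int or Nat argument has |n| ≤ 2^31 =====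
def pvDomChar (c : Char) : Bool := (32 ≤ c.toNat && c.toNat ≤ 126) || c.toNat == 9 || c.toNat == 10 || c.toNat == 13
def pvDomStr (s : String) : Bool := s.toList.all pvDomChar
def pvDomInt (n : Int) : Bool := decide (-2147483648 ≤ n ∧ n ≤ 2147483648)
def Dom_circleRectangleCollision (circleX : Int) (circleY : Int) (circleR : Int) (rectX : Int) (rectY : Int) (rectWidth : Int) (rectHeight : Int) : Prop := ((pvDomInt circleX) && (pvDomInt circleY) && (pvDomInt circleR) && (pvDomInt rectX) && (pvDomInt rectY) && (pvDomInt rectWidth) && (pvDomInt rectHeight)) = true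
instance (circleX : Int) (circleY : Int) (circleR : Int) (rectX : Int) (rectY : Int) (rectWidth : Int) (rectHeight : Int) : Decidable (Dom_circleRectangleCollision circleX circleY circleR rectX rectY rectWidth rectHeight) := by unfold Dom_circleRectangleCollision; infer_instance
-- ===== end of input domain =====

-- ===== PORT A =====
-- Header: B replaces A's scan of every rectangle lattice point with one distance check
-- against the per-axis clamp of the circle center (objective: alternative algorithm).
def circleRectangleCollision (circleX : Int) (circleY : Int) (circleR : Int) (rectX : Int) (rectY : Int) (rectWidth : Int) (rectHeight : Int) : Bool :=
  -- for x in range(...): for y in range(...): if dist2 <= r2: return True / return False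
  (PySem.List.pyRange rectX (rectX + rectWidth + 1) 1).any (fun x =>
    (PySem.List.pyRange rectY (rectY + rectHeight + 1) 1).any (fun y =>
      let distanceX := x - circleX
      let distanceY := y - circleY
      decide (distanceX * distanceX + distanceY * distanceY ≤ circleR * circleR)))

-- ===== PORT B =====
def circleRectangleCollision_alt (circleX : Int) (circleY : Int) (circleR : Int) (rectX : Int) (rectY : Int) (rectWidth : Int) (rectHeight : Int) : Bool :=
  if rectWidth < 0 || rectHeight < 0 then false
  else
    let nearestX := min (max circleX rectX) (rectX + rectWidth)
    let nearestY := min (max circleY rectY) (rectY + rectHeight)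
    let dx := nearestX - circleX
    let dy := nearestY - circleY
    decide (dx * dx + dy * dy ≤ circleR * circleR)

-- ===== PRECONDITION & SPEC =====
def Spec_circleRectangleCollision (circleX : Int) (circleY : Int) (circleR : Int) (rectX : Int) (rectY : Int) (rectWidth : Int) (rectHeight : Int) (out : Bool) : Prop := out = circleRectangleCollision_alt circleX circleY circleR rectX rectY rectWidth rectHeight
instance (circleX : Int) (circleY : Int) (circleR : Int) (rectX : Int) (rectY : Int) (rectWidth : Int) (rectHeight : Int) (out : Bool) : Decidable (Spec_circleRectangleCollision circleX circleY circleR rectX rectY rectWidth rectHeight out) := by unfold Spec_circleRectangleCollision; infer_instance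

-- ===== CLAIM (what is proved, stated in full; the proofs are below) =====
def Claim_equal_circleRectangleCollision : Prop := ∀ (circleX : Int) (circleY : Int) (circleR : Int) (rectX : Int) (rectY : Int) (rectWidth : Int) (rectHeight : Int), Dom_circleRectangleCollision circleX circleY circleR rectX rectY rectWidth rectHeight → Spec_circleRectangleCollision circleX circleY circleR rectX rectY rectWidth rectHeight (circleRectangleCollision circleX circleY circleR rectX rectY rectWidth rectHeight)

-- ===== LEMMAS AND PROOFS =====

-- ===== VERDICT (by name: the statement is the Claim_ definition above) =====
-- clamp of c into [a,b] minimizes the squared distance to c over [a,b]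
theorem pv_clamp_sq_le (c a b x : Int) (hax : a ≤ x) (hxb : x ≤ b) :
    (min (max c a) b - c) * (min (max c a) b - c) ≤ (x - c) * (x - c) := by
  by_cases h1 : c ≤ a
  · have : min (max c a) b = a := by omega
    rw [this]; nlinarith
  · by_cases h2 : c ≤ b
    · have : min (max c a) b = c := by omega
      rw [this]; nlinarith
    · have : min (max c a) b = b := by omega
      rw [this]; nlinarith

theorem circleRectangleCollision_spec : Claim_equal_circleRectangleCollision := by
  intro circleX circleY circleR rectX rectY rectWidth rectHeight _
  unfold Spec_circleRectangleCollision circleRectangleCollision circleRectangleCollision_alt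
  by_cases hempty : rectWidth < 0 || rectHeight < 0
  · -- one of the two ranges is empty, so the scan returns false
    simp only [hempty, if_true]
    rcases Bool.or_eq_true_iff.mp hempty with h | h
    · rw [PySem.List.pyRange_one_eq_nil (by simp at h; omega)]
      simp
    · rw [show PySem.List.pyRange rectY (rectY + rectHeight + 1) 1 = [] from
        PySem.List.pyRange_one_eq_nil (by simp at h; omega)]
      simp
  · rw [Bool.not_eq_true] at hempty
    simp only [hempty, Bool.false_eq_true, if_false]
    rw [Bool.or_eq_false_iff] at hempty
    have hw : 0 ≤ rectWidth := by have := hempty.1; simp at this; omega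
    have hh : 0 ≤ rectHeight := by have := hempty.2; simp at this; omega
    rw [Bool.eq_iff_iff]
    simp only [List.any_eq_true, PySem.List.mem_pyRange_one, decide_eq_true_eq]
    by_cases hc : (min (max circleX rectX) (rectX + rectWidth) - circleX) *
        (min (max circleX rectX) (rectX + rectWidth) - circleX) +
        (min (max circleY rectY) (rectY + rectHeight) - circleY) *
        (min (max circleY rectY) (rectY + rectHeight) - circleY) ≤ circleR * circleR
    · -- B says true: the clamped point witnesses the scan
      exact iff_of_true
        ⟨min (max circleX rectX) (rectX + rectWidth), ⟨by omega, by omega⟩,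
         min (max circleY rectY) (rectY + rectHeight), ⟨by omega, by omega⟩, hc⟩ hc
    · -- B says false: no lattice point can be closer than the clamp
      refine iff_of_false ?_ hc
      rintro ⟨x, ⟨hx1, hx2⟩, y, ⟨hy1, hy2⟩, hd⟩
      exact hc (le_trans (add_le_add
        (pv_clamp_sq_le circleX rectX (rectX + rectWidth) x hx1 (by omega))
        (pv_clamp_sq_le circleY rectY (rectY + rectHeight) y hy1 (by omega))) hd)
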